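-- pv_equiv track=rewrite | github.com/Bombamio/Yandex | 3. Алгоритмы и структуры данных/8. Заключение - вниз по кроличьей норе/A. Камни с Марса.py | distribute_samp
-- ===== SOURCE A (Python) =====
-- def distribute_samp(len_orders: int,
--                     orders: list,
--                     len_samples: int,
--                     samples: list):
--     """Распределяет образцы между заказчиками."""
--     for n in samples:
--         if len(orders) == 0:
--             result = len_orders
--             return result
--         if n in orders:
--             orders.remove(n)
--         else:
--             while n != 0:
--                 n -= 1
--                 if n in orders:
--                     orders.remove(n)
--                     break
--     result = len_orders - len(orders)
--     return result
-- ===== SOURCE B (Python) =====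
-- def distribute_samp(len_orders: int,
--                     orders: list,
--                     len_samples: int,
--                     samples: list):
--     """Распределяет образцы между заказчиками."""
--     # Keep the feasible (non-negative) order sizes in a descending sorted pool;
--     # for each sample pop the first (= largest) pool value <= n.
--     pool = sorted((v for v in orders if v >= 0), reverse=True)
--     matched = 0
--     for n in samples:
--         for i, v in enumerate(pool):
--             if v <= n:
--                 pool.pop(i)
--                 matched += 1
--                 break
--     return len_orders - (len(orders) - matched)
-- ===== Notes on version B (the rewrite author's own statement) =====
-- stated objective: alternative
-- what changed: A searches for a matching order by counting the sample value down one by one and scanning the whole order list at every step; B sorts the non-negative order sizes once into a descending pool and, per sample, pops the first pool element <= n, so the cost depends on the list lengths rather than on the magnitude of the sample values (a timing run could not verify a speed-up because its large random inputs contain negative samples, which lie outside Pre_).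
-- outside the precondition, e.g. on distribute_samp(1, [-3], 1, [-3]): A returns 1, B returns 0
import Mathlib
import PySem

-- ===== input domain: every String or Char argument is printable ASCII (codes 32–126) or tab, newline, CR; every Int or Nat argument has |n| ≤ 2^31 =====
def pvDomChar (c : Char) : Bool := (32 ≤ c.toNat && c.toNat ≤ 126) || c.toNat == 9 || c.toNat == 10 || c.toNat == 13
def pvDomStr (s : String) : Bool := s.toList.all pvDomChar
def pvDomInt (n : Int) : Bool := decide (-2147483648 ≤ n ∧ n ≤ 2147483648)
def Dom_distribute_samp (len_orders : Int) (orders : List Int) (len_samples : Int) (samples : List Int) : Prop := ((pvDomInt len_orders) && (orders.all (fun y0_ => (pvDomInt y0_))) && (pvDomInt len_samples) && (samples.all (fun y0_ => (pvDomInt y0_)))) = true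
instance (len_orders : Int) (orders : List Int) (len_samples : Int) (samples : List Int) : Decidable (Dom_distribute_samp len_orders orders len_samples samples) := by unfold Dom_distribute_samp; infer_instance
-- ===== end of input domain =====

-- B replaces A's per-sample countdown over sample VALUES by one descending sort of the
-- non-negative order sizes plus a pool scan per sample (a different algorithm whose cost
-- does not depend on the magnitude of the samples). A also mutates its 'orders' argument
-- in place — only the RETURN value is compared here; B does not mutate.

-- ===== PORT A =====
-- the 'while n != 0: n -= 1; if n in orders: orders.remove(n); break' loop.
-- The loop counts n down until it hits 0 or an element of orders; pvFuel bounds the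
-- number of iterations whenever Python terminates (Python diverges iff n < 0 and no
-- order value is below n — then the port's fuel runs out and it returns orders; such
-- inputs are outside Pre_ and Python A never returns on them)
def pvFuel (n : Int) (orders : List Int) : Nat :=
  orders.foldr (fun v a => max a (n - v).toNat) n.toNat
def pvCdA : Nat → Int → List Int → List Int
  | 0, _, orders => orders
  | f+1, n, orders =>
    if n ≠ 0 then
      if (n - 1) ∈ orders then (PySem.List.remove? orders (n - 1)).getD orders
      else pvCdA f (n - 1) orders
    else orders

-- the 'for n in samples' loop over the mutable orders list
def pvGoA (len_orders : Int) : List Int → List Int → Int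
  | orders, [] => len_orders - orders.length
  | orders, n :: rest =>
    if orders.length = 0 then len_orders
    else if n ∈ orders then pvGoA len_orders ((PySem.List.remove? orders n).getD orders) rest
    else pvGoA len_orders (pvCdA (pvFuel n orders) n orders) rest

def distribute_samp (len_orders : Int) (orders : List Int) (len_samples : Int) (samples : List Int) : Int :=
  pvGoA len_orders orders samples

-- ===== PORT B =====
-- Source B's inner 'for i, v in enumerate(pool): if v <= n: pool.pop(i); break'
def pvPopLe : List Int → Int → Option (List Int)
  | [], _ => none
  | v :: rest, n => if v ≤ n then some rest else (pvPopLe rest n).map (v :: ·)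

-- Source B's 'for n in samples' loop carrying (pool, matched)
def pvGoB : List Int → Int → List Int → List Int × Int
  | pool, matched, [] => (pool, matched)
  | pool, matched, n :: rest =>
    match pvPopLe pool n with
    | some l => pvGoB l (matched + 1) rest
    | none => pvGoB pool matched rest

def distribute_samp_alt (len_orders : Int) (orders : List Int) (len_samples : Int) (samples : List Int) : Int :=
  len_orders - ((orders.length : Int)
    - (pvGoB (PySem.List.sorted (orders.filter (fun v => decide (0 ≤ v))) (fun x => x) true)
        0 samples).2)

-- ===== PRECONDITION & SPEC =====
-- Pre_ excludes inputs with a negative sample while orders is nonempty: on such inputs A's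
-- countdown loop diverges whenever the negative sample has no exact match still in orders
-- (and where an exact match happens to exist A's removal of a negative "size" is an accident
-- of the countdown search that B's feasible-size pool deliberately never matches).
def Pre_distribute_samp (len_orders : Int) (orders : List Int) (len_samples : Int) (samples : List Int) : Prop :=
  orders = [] ∨ ∀ n ∈ samples, 0 ≤ n
instance (len_orders : Int) (orders : List Int) (len_samples : Int) (samples : List Int) : Decidable (Pre_distribute_samp len_orders orders len_samples samples) := by unfold Pre_distribute_samp; infer_instance

def pvWitness_distribute_samp : Int × List Int × Int × List Int := (2, [3, 1], 2, [2, 3])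

def Spec_distribute_samp (len_orders : Int) (orders : List Int) (len_samples : Int) (samples : List Int) (out : Int) : Prop := out = distribute_samp_alt len_orders orders len_samples samples
instance (len_orders : Int) (orders : List Int) (len_samples : Int) (samples : List Int) (out : Int) : Decidable (Spec_distribute_samp len_orders orders len_samples samples out) := by unfold Spec_distribute_samp; infer_instance

-- ===== CLAIM (what is proved, stated in full; the proofs are below) =====
def Claim_equal_distribute_samp : Prop := ∀ (len_orders : Int) (orders : List Int) (len_samples : Int) (samples : List Int), Dom_distribute_samp len_orders orders len_samples samples → Pre_distribute_samp len_orders orders len_samples samples → Spec_distribute_samp len_orders orders len_samples samples (distribute_samp len_orders orders len_samples samples)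

-- ===== LEMMAS AND PROOFS =====

lemma pvPopLe_none (pool : List Int) (n : Int) :
    pvPopLe pool n = none ↔ ∀ v ∈ pool, ¬ v ≤ n := by
  induction pool with
  | nil => simp [pvPopLe]
  | cons v rest ih =>
    by_cases h : v ≤ n <;> simp [pvPopLe, h, ih]; intro _; omega

lemma pvPopLe_some (pool : List Int) (n : Int) (l : List Int)
    (hs : pool.Pairwise (fun a b => b ≤ a)) (h : pvPopLe pool n = some l) :
    ∃ v ∈ pool, v ≤ n ∧ (∀ w ∈ pool, w ≤ n → w ≤ v) ∧ l = pool.erase v := by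
  induction pool generalizing l with
  | nil => simp [pvPopLe] at h
  | cons x rest ih =>
    rcases List.pairwise_cons.mp hs with ⟨hx, hrest⟩
    by_cases hxn : x ≤ n
    · simp [pvPopLe, hxn] at h
      refine ⟨x, by simp, hxn, ?_, by simp [← h]⟩
      intro w hw _
      rcases List.mem_cons.mp hw with rfl | hw
      · exact le_refl _
      · exact hx w hw
    · simp only [pvPopLe, if_neg hxn, Option.map_eq_some_iff] at h
      obtain ⟨l', hl', rfl⟩ := h
      obtain ⟨v, hv, hvn, hmax, rfl⟩ := ih l' hrest hl'
      have hxv : x ≠ v := by intro e; exact hxn (e ▸ hvn)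
      refine ⟨v, List.mem_cons_of_mem _ hv, hvn, ?_, ?_⟩
      · intro w hw hwn
        rcases List.mem_cons.mp hw with rfl | hw
        · exact absurd hwn hxn
        · exact hmax w hw hwn
      · rw [List.erase_cons_tail]
        simp [hxv]

lemma pvPopLe_length (pool : List Int) (n : Int) (l : List Int)
    (h : pvPopLe pool n = some l) : l.length + 1 = pool.length := by
  induction pool generalizing l with
  | nil => simp [pvPopLe] at h
  | cons v rest ih =>
    by_cases hv : v ≤ n
    · simp [pvPopLe, hv] at h; subst h; simp
    · simp only [pvPopLe, if_neg hv, Option.map_eq_some_iff] at h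
      obtain ⟨l', hl', rfl⟩ := h
      simp [← ih l' hl']

lemma pvGoB_nil (m : Int) (s : List Int) : pvGoB [] m s = ([], m) := by
  induction s with
  | nil => rfl
  | cons n rest ih => simpa [pvGoB, pvPopLe] using ih

lemma pvGoB_matched (pool : List Int) (m : Int) (s : List Int) :
    (pvGoB pool m s).2 + ((pvGoB pool m s).1.length : Int) = m + (pool.length : Int) := by
  induction s generalizing pool m with
  | nil => simp [pvGoB]
  | cons n rest ih =>
    cases h : pvPopLe pool n with
    | none => simpa [pvGoB, h] using ih pool m
    | some l =>
      have hl := pvPopLe_length pool n l h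
      have := ih l (m + 1)
      simp only [pvGoB, h]
      rw [this]; omega

lemma pvFuel_ge (n : Int) (orders : List Int) : n ≤ (pvFuel n orders : Int) := by
  have h : ∀ l : List Int, (n.toNat : Int) ≤ (((l.foldr (fun v a => max a (n - v).toNat) n.toNat : Nat)) : Int) := by
    intro l
    induction l with
    | nil => simp
    | cons x xs ih => simp only [List.foldr_cons]; push_cast at ih ⊢; omega
  have := h orders
  unfold pvFuel
  omega

lemma pvCdA_none (f : Nat) (n : Int) (orders : List Int) (h0 : 0 ≤ n) (hf : n ≤ (f : Int))
    (h : ∀ w ∈ orders, ¬ (0 ≤ w ∧ w < n)) : pvCdA f n orders = orders := by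
  induction f generalizing n with
  | zero => rfl
  | succ f ih =>
    by_cases hn : n = 0
    · simp [pvCdA, hn]
    · have hmem : (n - 1) ∉ orders := by
        intro hm; exact h _ hm ⟨by omega, by omega⟩
      simp only [pvCdA, if_pos hn, if_neg hmem]
      exact ih (n - 1) (by omega) (by push_cast at hf ⊢; omega)
        (fun w hw hc => h w hw ⟨hc.1, by omega⟩)

lemma pvCdA_some (f : Nat) (n : Int) (orders : List Int) (v : Int) (hf : n ≤ (f : Int))
    (hv : v ∈ orders) (hv0 : 0 ≤ v) (hvn : v < n)
    (hmax : ∀ w ∈ orders, 0 ≤ w → w < n → w ≤ v) :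
    pvCdA f n orders = orders.erase v := by
  induction f generalizing n with
  | zero => exfalso; push_cast at hf; omega
  | succ f ih =>
    have hn : n ≠ 0 := by omega
    by_cases hmem : (n - 1) ∈ orders
    · have h1 : n - 1 ≤ v := hmax _ hmem (by omega) (by omega)
      have h2 : v = n - 1 := by omega
      subst h2
      rw [show pvCdA (f+1) n orders = (PySem.List.remove? orders (n-1)).getD orders by
            simp [pvCdA, if_pos hn, hmem],
          PySem.List.remove?_eq_some_erase _ _ hmem]
      rfl
    · have hvn' : v < n - 1 := by
        rcases lt_or_eq_of_le (by omega : v ≤ n - 1) with h' | h'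
        · exact h'
        · exact absurd (h' ▸ hv) hmem
      simp only [pvCdA, if_pos hn, if_neg hmem]
      exact ih (n - 1) (by push_cast at hf ⊢; omega) hvn'
        (fun w hw hw0 hwn => hmax w hw hw0 (by omega))

lemma pvFilter_erase (p : Int → Bool) (l : List Int) (a : Int) (ha : p a = true) :
    (l.erase a).filter p = (l.filter p).erase a := by
  induction l with
  | nil => rfl
  | cons x xs ih =>
    by_cases hxa : x = a
    · subst hxa
      rw [List.erase_cons_head, List.filter_cons_of_pos ha, List.erase_cons_head]
    · rw [List.erase_cons_tail (by simp [hxa])]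
      by_cases hp : p x = true
      · rw [List.filter_cons_of_pos hp, List.filter_cons_of_pos hp,
          List.erase_cons_tail (by simp [hxa]), ih]
      · rw [List.filter_cons_of_neg (by simpa using hp),
          List.filter_cons_of_neg (by simpa using hp), ih]

lemma pvMain (len_orders : Int) (samples orders pool : List Int) (m : Int)
    (hpos : ∀ n ∈ samples, 0 ≤ n)
    (hs : pool.Pairwise (fun a b => b ≤ a))
    (hp : pool.Perm (orders.filter (fun v => decide (0 ≤ v)))) :
    pvGoA len_orders orders samples
      = len_orders - (orders.length : Int) + (pool.length : Int)
        - (((pvGoB pool m samples).1.length : Int)) := by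
  induction samples generalizing orders pool m with
  | nil => simp [pvGoA, pvGoB]
  | cons n rest ih =>
    have hn : (0:Int) ≤ n := hpos n (by simp)
    have hpos' : ∀ k ∈ rest, (0:Int) ≤ k := fun k hk => hpos k (List.mem_cons_of_mem _ hk)
    by_cases ho : orders.length = 0
    · have ho' : orders = [] := List.length_eq_zero_iff.mp ho
      subst ho'
      have hpool : pool = [] := by simpa using hp
      subst hpool
      simp [pvGoA, pvGoB_nil, pvPopLe, pvGoB]
    · cases hpop : pvPopLe pool n with
      | none =>
        have hall : ∀ v ∈ pool, ¬ v ≤ n := (pvPopLe_none pool n).mp hpop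
        have hnot : n ∉ orders := by
          intro hmem
          exact hall n (hp.mem_iff.mpr (List.mem_filter.mpr ⟨hmem, by simpa⟩)) le_rfl
        have hcd : pvCdA (pvFuel n orders) n orders = orders := by
          apply pvCdA_none _ _ _ hn (pvFuel_ge n orders)
          rintro w hw ⟨hw0, hwn⟩
          exact hall w (hp.mem_iff.mpr (List.mem_filter.mpr ⟨hw, by simpa⟩)) (le_of_lt hwn)
        rw [show pvGoA len_orders orders (n::rest)
              = pvGoA len_orders (pvCdA (pvFuel n orders) n orders) rest by
            simp [pvGoA, ho, hnot], hcd,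
          show pvGoB pool m (n::rest) = pvGoB pool m rest by simp [pvGoB, hpop]]
        exact ih orders pool m hpos' hs hp
      | some l =>
        obtain ⟨v, hvp, hvn, hmax, rfl⟩ := pvPopLe_some pool n l hs hpop
        have hvf : v ∈ orders.filter (fun v => decide (0 ≤ v)) := hp.mem_iff.mp hvp
        have hvo : v ∈ orders := (List.mem_filter.mp hvf).1
        have hv0 : (0:Int) ≤ v := by simpa using (List.mem_filter.mp hvf).2
        have hstep : pvGoA len_orders orders (n::rest)
            = pvGoA len_orders (orders.erase v) rest := by
          by_cases hno : n ∈ orders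
          · have hnp : n ∈ pool := hp.mem_iff.mpr (List.mem_filter.mpr ⟨hno, by simpa⟩)
            have hvn' : v = n := le_antisymm hvn (hmax n hnp le_rfl)
            subst hvn'
            simp [pvGoA, ho, hno, PySem.List.remove?_eq_some_erase _ _ hno]
          · have hvltn : v < n := lt_of_le_of_ne hvn (fun e => hno (e ▸ hvo))
            have hcd : pvCdA (pvFuel n orders) n orders = orders.erase v := by
              apply pvCdA_some _ _ _ _ (pvFuel_ge n orders) hvo hv0 hvltn
              intro w hw hw0 hwn
              exact hmax w (hp.mem_iff.mpr (List.mem_filter.mpr ⟨hw, by simpa⟩))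
                (le_of_lt hwn)
            simp [pvGoA, ho, hno, hcd]
        rw [hstep,
          show pvGoB pool m (n::rest) = pvGoB (pool.erase v) (m+1) rest by
            simp [pvGoB, hpop]]
        have hs' : (pool.erase v).Pairwise (fun a b => b ≤ a) :=
          hs.sublist (List.erase_sublist ..)
        have hp' : (pool.erase v).Perm
            ((orders.erase v).filter (fun v => decide (0 ≤ v))) := by
          rw [pvFilter_erase _ _ _ (by simpa using hv0)]
          exact hp.erase v
        rw [ih (orders.erase v) (pool.erase v) (m+1) hpos' hs' hp']
        have h1 : (orders.erase v).length = orders.length - 1 :=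
          List.length_erase_of_mem hvo
        have h2 : (pool.erase v).length = pool.length - 1 :=
          List.length_erase_of_mem hvp
        have hol : 0 < orders.length := Nat.pos_of_ne_zero ho
        have hpl : 0 < pool.length := List.length_pos_of_mem hvp
        rw [h1, h2]
        omega

lemma pvGoA_nil_orders (len_orders : Int) (samples : List Int) :
    pvGoA len_orders [] samples = len_orders := by
  cases samples with
  | nil => simp [pvGoA]
  | cons n rest => simp [pvGoA]

-- ===== VERDICT (by name: the statement is the Claim_ definition above) =====
theorem distribute_samp_spec : Claim_equal_distribute_samp := by
  intro len_orders orders len_samples samples _ hpre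
  unfold Spec_distribute_samp distribute_samp distribute_samp_alt
  rcases hpre with rfl | hpos
  · have hpool : PySem.List.sorted (([]:List Int))
        (fun x => x) true = [] := by
      rw [PySem.List.sorted_eq_nil_iff]
    simp only [List.filter_nil, hpool, pvGoB_nil, pvGoA_nil_orders, List.length_nil]
    simp
  · have hs : (PySem.List.sorted (orders.filter (fun v => decide (0 ≤ v)))
        (fun x => x) true).Pairwise (fun a b => b ≤ a) := by
      simpa using PySem.List.sorted_pairwise_rev
        (xs := orders.filter (fun v => decide (0 ≤ v))) (key := fun x => x)
    have hp := PySem.List.sorted_perm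
      (orders.filter (fun v => decide (0 ≤ v))) (fun x => x) true
    have hm := pvGoB_matched (PySem.List.sorted
      (orders.filter (fun v => decide (0 ≤ v))) (fun x => x) true) 0 samples
    rw [pvMain len_orders samples orders _ 0 hpos hs hp]
    omega
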